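-- pv_equiv track=rewrite | github.com/phootoon/dna-sequencing-genetic-algorithm | functions.py | preprocess_spectrum
-- ===== SOURCE A (Python) =====
-- def preprocess_spectrum(fragments, l):
--     def can_merge(f1, f2):
--         """Check if the last l-1 characters of f1 match the first l-1 characters of f2."""
--         return f1[-(l - 1):] == f2[:(l - 1)]
--
--     used = set()
--     new_spectrum = []
--
--     for i in range(len(fragments)):
--         if i in used:
--             continue
--         chain = fragments[i]
--         used.add(i)
--
--         while True:
--             found = False
--             for j in range(len(fragments)):
--                 if j not in used and can_merge(chain, fragments[j]):
--                     chain += fragments[j][-(l - 1):][-1]  # Add only the non-overlapping character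
--                     used.add(j)
--                     found = True
--                     break
--             if not found:
--                 break
--
--         new_spectrum.append(chain)
--
--     return new_spectrum
-- ===== SOURCE B (Python) =====
-- def preprocess_spectrum(fragments, l):
--     # Index fragments by their (l-1)-char prefix once; each extension step then
--     # probes only the bucket of the chain's suffix instead of scanning all fragments.
--     n = len(fragments)
--     buckets = {}
--     for i in range(n):
--         buckets.setdefault(fragments[i][:(l - 1)], []).append(i)
--
--     used = [False] * n
--     out = []
--     for i in range(n):
--         if used[i]:
--             continue
--         used[i] = True
--         chain = fragments[i]
--         while True:
--             j = None
--             for c in buckets.get(chain[-(l - 1):], ()):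
--                 if not used[c]:
--                     j = c
--                     break
--             if j is None:
--                 break
--             chain += fragments[j][-(l - 1):][-1]
--             used[j] = True
--         out.append(chain)
--     return out
-- ===== Notes on version B (the rewrite author's own statement) =====
-- stated objective: faster
-- what changed: B builds a dict of (l-1)-char-prefix buckets (index lists in increasing order) once and extends each chain by probing only the bucket of the chain's current suffix, replacing A's repeated O(n) scan over all fragments per merge step; used becomes a boolean array.
import Mathlib
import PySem

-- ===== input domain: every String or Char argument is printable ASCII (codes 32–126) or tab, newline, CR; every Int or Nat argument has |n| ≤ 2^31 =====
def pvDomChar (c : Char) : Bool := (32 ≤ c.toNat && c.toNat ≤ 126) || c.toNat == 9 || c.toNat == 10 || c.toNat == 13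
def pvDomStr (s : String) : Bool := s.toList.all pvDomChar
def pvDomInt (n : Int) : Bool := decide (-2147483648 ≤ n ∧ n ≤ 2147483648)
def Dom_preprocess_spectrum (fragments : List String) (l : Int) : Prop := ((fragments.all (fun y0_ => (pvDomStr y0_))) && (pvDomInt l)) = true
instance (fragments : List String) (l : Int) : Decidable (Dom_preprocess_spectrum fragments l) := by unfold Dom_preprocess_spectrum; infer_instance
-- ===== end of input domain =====

-- B replaces A's O(n) inner scan per merge step with a dict of (l-1)-char-prefix
-- buckets built once, probing only the bucket of the chain's current suffix (faster).

-- ===== PORT A =====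
-- f1[-(l-1):]
def pvSfxA (l : Int) (s : String) : String := PySem.Str.slice s (some (-(l - 1))) none
-- f2[:(l-1)]
def pvPfxA (l : Int) (s : String) : String := PySem.Str.slice s none (some (l - 1))
-- fragments[j][-(l-1):][-1]; none = IndexError (excluded by Pre_), ported as ""
def pvLastA (l : Int) (f : String) : String :=
  match PySem.Str.pyGet? (pvSfxA l f) (-1) with
  | some c => String.ofList [c]
  | none => ""

-- the inner 'for j in range(len(fragments)) … break' scan
def pvFindA (fragments : List String) (l : Int) (used : PySem.Set Nat) (chain : String) : Option Nat :=
  (List.range fragments.length).find?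
    (fun j => !(PySem.Set.contains used j) && (pvSfxA l chain == pvPfxA l (fragments.getD j "")))

-- the 'while True' loop; each found iteration marks one fresh j used, so
-- fragments.length + 1 fuel always suffices (the fuel guard is never reached)
def pvWhileA (fragments : List String) (l : Int) :
    Nat → String → PySem.Set Nat → String × PySem.Set Nat
  | 0, chain, used => (chain, used)
  | fuel + 1, chain, used =>
    match pvFindA fragments l used chain with
    | none => (chain, used)
    | some j =>
        pvWhileA fragments l fuel (chain ++ pvLastA l (fragments.getD j ""))
          (PySem.Set.add used j)

-- the outer 'for i in range(len(fragments))'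
def pvOuterA (fragments : List String) (l : Int) :
    List Nat → PySem.Set Nat → List String → List String
  | [], _, acc => acc
  | i :: is, used, acc =>
    if PySem.Set.contains used i then pvOuterA fragments l is used acc
    else
      let r := pvWhileA fragments l (fragments.length + 1) (fragments.getD i "")
        (PySem.Set.add used i)
      pvOuterA fragments l is r.2 (acc ++ [r.1])

def preprocess_spectrum (fragments : List String) (l : Int) : List String :=
  pvOuterA fragments l (List.range fragments.length) PySem.Set.empty []

-- ===== PORT B =====
-- fragments[i][:(l-1)]
def pvKeyB (l : Int) (s : String) : String := PySem.Str.slice s none (some (l - 1))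
-- chain[-(l-1):]
def pvSfxB (l : Int) (s : String) : String := PySem.Str.slice s (some (-(l - 1))) none
-- fragments[j][-(l-1):][-1]; none = IndexError (excluded by Pre_), ported as ""
def pvLastB (l : Int) (f : String) : String :=
  match PySem.Str.pyGet? (pvSfxB l f) (-1) with
  | some c => String.ofList [c]
  | none => ""

-- buckets: for i in range(n): buckets.setdefault(fragments[i][:(l-1)], []).append(i)
def pvBucketsB (fragments : List String) (l : Int) : PySem.Dict String (List Nat) :=
  ((List.range fragments.length).map (fun i => (pvKeyB l (fragments.getD i ""), i))).foldl
    (fun d q => d.modify q.1 [] (fun v => v ++ [q.2])) PySem.Dict.empty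

-- 'for c in buckets.get(key, ()) … break'
def pvFindB (buckets : PySem.Dict String (List Nat)) (used : List Bool) (key : String) :
    Option Nat :=
  (buckets.getD key []).find? (fun c => !(used.getD c false))

def pvWhileB (fragments : List String) (l : Int) (buckets : PySem.Dict String (List Nat)) :
    Nat → String → List Bool → String × List Bool
  | 0, chain, used => (chain, used)
  | fuel + 1, chain, used =>
    match pvFindB buckets used (pvSfxB l chain) with
    | none => (chain, used)
    | some j =>
        pvWhileB fragments l buckets fuel (chain ++ pvLastB l (fragments.getD j ""))
          (used.set j true)

def pvOuterB (fragments : List String) (l : Int) (buckets : PySem.Dict String (List Nat)) :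
    List Nat → List Bool → List String → List String
  | [], _, acc => acc
  | i :: is, used, acc =>
    if used.getD i false then pvOuterB fragments l buckets is used acc
    else
      let used1 := used.set i true
      let r := pvWhileB fragments l buckets (fragments.length + 1) (fragments.getD i "") used1
      pvOuterB fragments l buckets is r.2 (acc ++ [r.1])

def preprocess_spectrum_alt (fragments : List String) (l : Int) : List String :=
  pvOuterB fragments l (pvBucketsB fragments l) (List.range fragments.length)
    (List.replicate fragments.length false) []

-- ===== PRECONDITION & SPEC =====
-- Pre_ excludes exactly the inputs where the Python A raises IndexError on
-- fragments[j][-(l-1):][-1]: for l = 1 two consecutive fragments whose merge slice is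
-- empty; for l ≠ 1 two fragments whose slice f[-(l-1):] is empty (length ≤ max 0 (1-l)).
def Pre_preprocess_spectrum (fragments : List String) (l : Int) : Prop :=
  if l = 1 then
    ∀ i ∈ List.range (fragments.length - 1),
      ¬ ((fragments.getD i "").toList = [] ∧ (fragments.getD (i + 1) "").toList = [])
  else
    (fragments.filter (fun f => decide ((f.toList.length : Int) ≤ max 0 (1 - l)))).length ≤ 1
instance (fragments : List String) (l : Int) : Decidable (Pre_preprocess_spectrum fragments l) := by
  unfold Pre_preprocess_spectrum; infer_instance

def pvWitness_preprocess_spectrum : List String × Int := (["ab", "bc", "cd"], 2)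

def Spec_preprocess_spectrum (fragments : List String) (l : Int) (out : List String) : Prop :=
  out = preprocess_spectrum_alt fragments l
instance (fragments : List String) (l : Int) (out : List String) :
    Decidable (Spec_preprocess_spectrum fragments l out) := by
  unfold Spec_preprocess_spectrum; infer_instance

-- ===== CLAIM (what is proved, stated in full; the proofs are below) =====
def Claim_equal_preprocess_spectrum : Prop :=
  ∀ (fragments : List String) (l : Int), Dom_preprocess_spectrum fragments l →
    Pre_preprocess_spectrum fragments l →
    Spec_preprocess_spectrum fragments l (preprocess_spectrum fragments l)

-- ===== LEMMAS AND PROOFS =====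

theorem pvLast_eq : pvLastB = pvLastA := rfl

theorem pvFind?_filter {α : Type} (l : List α) (p q : α → Bool) :
    (l.filter q).find? p = l.find? (fun a => q a && p a) := by
  induction l with
  | nil => rfl
  | cons x xs ih =>
    by_cases hq : q x = true
    · by_cases hp : p x = true
      · simp [hq, hp]
      · simp only [Bool.not_eq_true] at hp
        simp [hq, hp, ih]
    · simp only [Bool.not_eq_true] at hq
      simp [hq, ih]

theorem pvFind?_congr {α : Type} (l : List α) (p q : α → Bool)
    (h : ∀ a ∈ l, p a = q a) : l.find? p = l.find? q := by
  induction l with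
  | nil => rfl
  | cons x xs ih =>
    have hx := h x (by simp)
    by_cases hp : p x = true
    · simp [hp, hx ▸ hp]
    · simp only [Bool.not_eq_true] at hp
      simp [hp, hx ▸ hp, ih fun a ha => h a (by simp [ha])]

-- bucket contents: exactly the indices with matching prefix, in increasing order
theorem pvBuckets_getD (fragments : List String) (l : Int) (key : String) :
    (pvBucketsB fragments l).getD key []
      = (List.range fragments.length).filter
          (fun j => pvKeyB l (fragments.getD j "") == key) := by
  unfold pvBucketsB
  rw [PySem.Dict.getD_foldl_modify_append]
  simp [PySem.Dict.getD_empty, List.filter_map, Function.comp_def, List.map_map]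

theorem pvUsedB_getD (n : Nat) (f : Nat → Bool) (i : Nat) (hi : i < n) :
    ((List.range n).map f).getD i false = f i := by
  simp [List.getD, List.getElem?_map, List.getElem?_range hi]

theorem pvUsedB_set (n : Nat) (usedA : PySem.Set Nat) (j : Nat) (_hj : j < n) :
    ((List.range n).map (fun j' => PySem.Set.contains usedA j')).set j true
      = (List.range n).map (fun j' => PySem.Set.contains (PySem.Set.add usedA j) j') := by
  apply List.ext_getElem
  · simp
  · intro i h1 h2
    simp only [List.length_set, List.length_map, List.length_range] at h1
    rw [List.getElem_set]
    by_cases hij : j = i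
    · subst hij
      simp only [List.getElem_map, List.getElem_range]
      rw [Bool.eq_iff_iff, PySem.Set.contains_iff]
      simp [PySem.Set.mem_add]
    · simp only [if_neg hij, List.getElem_map, List.getElem_range]
      rw [Bool.eq_iff_iff, PySem.Set.contains_iff, PySem.Set.contains_iff,
        PySem.Set.mem_add]
      constructor
      · exact Or.inl
      · rintro (h | h)
        · exact h
        · exact absurd h.symm hij

theorem pvFind_eq (fragments : List String) (l : Int) (chain : String)
    (usedA : PySem.Set Nat) :
    pvFindB (pvBucketsB fragments l)
        ((List.range fragments.length).map (fun j => PySem.Set.contains usedA j))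
        (pvSfxB l chain)
      = pvFindA fragments l usedA chain := by
  unfold pvFindB pvFindA
  rw [pvBuckets_getD, pvFind?_filter]
  apply pvFind?_congr
  intro j hj_
  have hjn : j < fragments.length := List.mem_range.mp hj_
  rw [pvUsedB_getD _ _ _ hjn]
  rw [Bool.and_comm]
  congr 1
  rw [Bool.eq_iff_iff]
  simp only [beq_iff_eq]
  exact ⟨Eq.symm, Eq.symm⟩

theorem pvWhile_eq (fragments : List String) (l : Int) :
    ∀ (fuel : Nat) (chain : String) (usedA : PySem.Set Nat),
      (pvWhileB fragments l (pvBucketsB fragments l) fuel chain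
            ((List.range fragments.length).map (fun j => PySem.Set.contains usedA j))).1
          = (pvWhileA fragments l fuel chain usedA).1
        ∧ (pvWhileB fragments l (pvBucketsB fragments l) fuel chain
            ((List.range fragments.length).map (fun j => PySem.Set.contains usedA j))).2
          = (List.range fragments.length).map
              (fun j => PySem.Set.contains ((pvWhileA fragments l fuel chain usedA).2) j) := by
  intro fuel
  induction fuel with
  | zero => intro chain usedA; exact ⟨rfl, rfl⟩
  | succ fuel ih =>
    intro chain usedA
    show (pvWhileB _ _ _ (fuel + 1) _ _).1 = _ ∧ _
    unfold pvWhileB pvWhileA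
    rw [pvFind_eq]
    cases hfind : pvFindA fragments l usedA chain with
    | none => exact ⟨rfl, rfl⟩
    | some j =>
      have hjn : j < fragments.length :=
        List.mem_range.mp (List.mem_of_find?_eq_some hfind)
      simp only
      rw [pvLast_eq, pvUsedB_set _ _ _ hjn]
      exact ih _ (PySem.Set.add usedA j)

theorem pvOuter_eq (fragments : List String) (l : Int) :
    ∀ (is : List Nat) (usedA : PySem.Set Nat) (acc : List String),
      (∀ i ∈ is, i < fragments.length) →
      pvOuterB fragments l (pvBucketsB fragments l) is
          ((List.range fragments.length).map (fun j => PySem.Set.contains usedA j)) acc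
        = pvOuterA fragments l is usedA acc := by
  intro is
  induction is with
  | nil => intro usedA acc _; rfl
  | cons i is ih =>
    intro usedA acc hlt
    have hin : i < fragments.length := hlt i (by simp)
    unfold pvOuterB pvOuterA
    rw [pvUsedB_getD _ _ _ hin]
    by_cases hc : PySem.Set.contains usedA i = true
    · rw [if_pos hc, if_pos hc]
      exact ih usedA acc fun a ha => hlt a (by simp [ha])
    · simp only [Bool.not_eq_true] at hc
      rw [if_neg (by rw [hc]; simp), if_neg (by rw [hc]; simp)]
      simp only
      rw [pvUsedB_set _ _ _ hin]
      have hw := pvWhile_eq fragments l (fragments.length + 1) (fragments.getD i "")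
        (PySem.Set.add usedA i)
      rw [hw.1, hw.2]
      exact ih _ _ fun a ha => hlt a (by simp [ha])

theorem pvInit_used (n : Nat) :
    List.replicate n false
      = (List.range n).map (fun j => PySem.Set.contains (PySem.Set.empty (α := Nat)) j) := by
  apply List.ext_getElem
  · simp
  · intro i h1 h2
    simp [List.getElem_replicate, PySem.Set.contains, PySem.Set.empty]

-- ===== VERDICT (by name: the statement is the Claim_ definition above) =====
theorem preprocess_spectrum_spec : Claim_equal_preprocess_spectrum := by
  intro fragments l _ _
  unfold Spec_preprocess_spectrum preprocess_spectrum preprocess_spectrum_alt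
  rw [pvInit_used]
  exact (pvOuter_eq fragments l (List.range fragments.length) PySem.Set.empty []
    (fun i hi => List.mem_range.mp hi)).symm
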